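-- pv_equiv track=rewrite | github.com/descampsk/advent-of-code | 2022/jeanRobertII/09/mainP1.py | isTOneCaseAwayFromHOnSameRowOrCol
-- ===== SOURCE A (Python) =====
-- def isTOneCaseAwayFromHOnSameRowOrCol(tPosition, hPosition):
--     adjacentCases = [
--         (hPosition[0]-1, hPosition[1]),
--         (hPosition[0], hPosition[1]+1),
--         (hPosition[0], hPosition[1]-1),
--         (hPosition[0]+1, hPosition[1]),
--     ]
--
--     for adjacentCase in adjacentCases:
--         if tPosition == adjacentCase:
--             return True
--
--     return False
-- ===== SOURCE B (Python) =====
-- def isTOneCaseAwayFromHOnSameRowOrCol(tPosition, hPosition):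
--     dx = tPosition[0] - hPosition[0]
--     dy = tPosition[1] - hPosition[1]
--     return abs(dx) + abs(dy) == 1
-- ===== Notes on version B (the rewrite author's own statement) =====
-- stated objective: simpler
-- what changed: Replaces building a list of the four orthogonal neighbours and scanning it with a closed-form Manhattan-distance test |dx|+|dy| == 1.
import Mathlib
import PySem

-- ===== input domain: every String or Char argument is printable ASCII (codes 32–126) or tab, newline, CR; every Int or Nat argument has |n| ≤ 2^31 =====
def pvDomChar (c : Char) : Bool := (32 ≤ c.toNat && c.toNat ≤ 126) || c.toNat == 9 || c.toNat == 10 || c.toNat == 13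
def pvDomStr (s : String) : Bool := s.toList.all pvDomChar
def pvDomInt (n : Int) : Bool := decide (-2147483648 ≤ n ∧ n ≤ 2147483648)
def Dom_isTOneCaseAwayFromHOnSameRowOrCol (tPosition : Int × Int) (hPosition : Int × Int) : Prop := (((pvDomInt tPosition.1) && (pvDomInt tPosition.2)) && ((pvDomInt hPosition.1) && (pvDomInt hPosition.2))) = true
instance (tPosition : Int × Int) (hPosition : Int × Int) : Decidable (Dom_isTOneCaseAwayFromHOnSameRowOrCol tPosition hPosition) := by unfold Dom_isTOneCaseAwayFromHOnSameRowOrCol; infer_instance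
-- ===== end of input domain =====

-- ===== PORT A =====
-- literal port of A: build the four adjacent cases, scan for equality
def isTOneCaseAwayFromHOnSameRowOrCol (tPosition : Int × Int) (hPosition : Int × Int) : Bool :=
  let adjacentCases : List (Int × Int) :=
    [ (hPosition.1 - 1, hPosition.2),
      (hPosition.1, hPosition.2 + 1),
      (hPosition.1, hPosition.2 - 1),
      (hPosition.1 + 1, hPosition.2) ]
  adjacentCases.any (fun adjacentCase => tPosition == adjacentCase)

-- ===== PORT B =====
-- B: closed-form Manhattan-distance test
def isTOneCaseAwayFromHOnSameRowOrCol_alt (tPosition : Int × Int) (hPosition : Int × Int) : Bool :=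
  let dx := tPosition.1 - hPosition.1
  let dy := tPosition.2 - hPosition.2
  dx.natAbs + dy.natAbs == 1

-- ===== PRECONDITION & SPEC =====
def Spec_isTOneCaseAwayFromHOnSameRowOrCol (tPosition : Int × Int) (hPosition : Int × Int) (out : Bool) : Prop := out = isTOneCaseAwayFromHOnSameRowOrCol_alt tPosition hPosition
instance (tPosition : Int × Int) (hPosition : Int × Int) (out : Bool) : Decidable (Spec_isTOneCaseAwayFromHOnSameRowOrCol tPosition hPosition out) := by unfold Spec_isTOneCaseAwayFromHOnSameRowOrCol; infer_instance

-- ===== CLAIM (what is proved, stated in full; the proofs are below) =====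
def Claim_equal_isTOneCaseAwayFromHOnSameRowOrCol : Prop := ∀ (tPosition : Int × Int) (hPosition : Int × Int), Dom_isTOneCaseAwayFromHOnSameRowOrCol tPosition hPosition → Spec_isTOneCaseAwayFromHOnSameRowOrCol tPosition hPosition (isTOneCaseAwayFromHOnSameRowOrCol tPosition hPosition)

-- ===== LEMMAS AND PROOFS =====

-- ===== VERDICT (by name: the statement is the Claim_ definition above) =====
theorem isTOneCaseAwayFromHOnSameRowOrCol_spec : Claim_equal_isTOneCaseAwayFromHOnSameRowOrCol := by
  intro t h _
  obtain ⟨tx, ty⟩ := t; obtain ⟨hx, hy⟩ := h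
  unfold Spec_isTOneCaseAwayFromHOnSameRowOrCol
  simp only [isTOneCaseAwayFromHOnSameRowOrCol, isTOneCaseAwayFromHOnSameRowOrCol_alt,
    List.any_cons, List.any_nil, Bool.or_false]
  rw [Bool.eq_iff_iff]
  simp only [Bool.or_eq_true, beq_iff_eq, Prod.mk.injEq]
  omega
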